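-- pv_equiv track=rewrite | github.com/Mewzok/python-exercises | day41_exercise.py | unique_purchase_totals
-- ===== SOURCE A (Python) =====
-- def unique_purchase_totals(purchases):
--     totals = {}
--     seen_purchases = {}
--
--     for user, amount in purchases:
--
--         totals.setdefault(user, 0)
--         seen_purchases.setdefault(user, set())
--
--         if amount is not None and amount > 0:
--             if amount not in seen_purchases[user]:
--                 totals[user] += amount
--                 seen_purchases[user].add(amount)
--
--     return totals
-- ===== SOURCE B (Python) =====
-- def unique_purchase_totals(purchases):
--     # Index phase: per-user set of unique positive amounts (users registered even with no valid purchase).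
--     groups = {}
--     for user, amount in purchases:
--         s = groups.setdefault(user, set())
--         if amount is not None and amount > 0:
--             s.add(amount)
--     # Reduce phase: sum each user's set.
--     return {user: sum(amounts) for user, amounts in groups.items()}
-- ===== Notes on version B (the rewrite author's own statement) =====
-- stated objective: alternative
-- what changed: A maintains a running totals dict updated inline inside the loop; B builds an index of per-user sets of unique positive amounts in one pass and then produces the result in a separate reduce pass with a dict comprehension summing each set.
import Mathlib
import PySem

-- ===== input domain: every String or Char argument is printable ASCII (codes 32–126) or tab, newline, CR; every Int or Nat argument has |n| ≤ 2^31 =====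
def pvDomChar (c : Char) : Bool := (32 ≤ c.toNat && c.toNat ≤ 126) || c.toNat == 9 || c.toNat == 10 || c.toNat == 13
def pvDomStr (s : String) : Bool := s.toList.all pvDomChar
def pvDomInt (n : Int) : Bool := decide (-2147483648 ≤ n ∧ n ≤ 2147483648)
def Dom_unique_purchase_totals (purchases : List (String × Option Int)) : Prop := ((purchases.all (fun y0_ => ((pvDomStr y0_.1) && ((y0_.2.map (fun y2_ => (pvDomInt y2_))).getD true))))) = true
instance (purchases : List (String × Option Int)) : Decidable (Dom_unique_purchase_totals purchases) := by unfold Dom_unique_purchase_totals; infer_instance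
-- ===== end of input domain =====

-- B replaces A's inline running-totals update by an index-then-reduce decomposition
-- (one pass building per-user sets of unique positive amounts, then a comprehension
-- summing each set); same cost, different structure (objective: alternative).

-- ===== PORT A =====
-- loop body of A, step for step: setdefault both dicts, then conditionally add
def uptStepA (st : PySem.Dict String Int × PySem.Dict String (PySem.Set Int))
    (up : String × Option Int) : PySem.Dict String Int × PySem.Dict String (PySem.Set Int) :=
  let totals := st.1.setdefault up.1 0
  let seen := st.2.setdefault up.1 PySem.Set.empty
  match up.2 with
  | none => (totals, seen)
  | some a =>
    if a > 0 then
      if PySem.Set.contains (seen.getD up.1 PySem.Set.empty) a then (totals, seen)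
      else (totals.modify up.1 0 (· + a),
            seen.modify up.1 PySem.Set.empty (fun s => PySem.Set.add s a))
    else (totals, seen)

def unique_purchase_totals (purchases : List (String × Option Int)) : List (String × Int) :=
  (purchases.foldl uptStepA (PySem.Dict.empty, PySem.Dict.empty)).1.items

-- ===== PORT B =====
-- loop body of B's index phase: register the user, add the amount to its set when valid
def uptStepB (g : PySem.Dict String (PySem.Set Int))
    (up : String × Option Int) : PySem.Dict String (PySem.Set Int) :=
  let g := g.setdefault up.1 PySem.Set.empty
  match up.2 with
  | none => g
  | some a =>
    if a > 0 then g.modify up.1 PySem.Set.empty (fun s => PySem.Set.add s a) else g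

def unique_purchase_totals_alt (purchases : List (String × Option Int)) : List (String × Int) :=
  let groups := purchases.foldl uptStepB PySem.Dict.empty
  groups.items.map (fun p => (p.1, p.2.sum))

-- ===== PRECONDITION & SPEC =====
def Spec_unique_purchase_totals (purchases : List (String × Option Int)) (out : List (String × Int)) : Prop := out = unique_purchase_totals_alt purchases
instance (purchases : List (String × Option Int)) (out : List (String × Int)) : Decidable (Spec_unique_purchase_totals purchases out) := by unfold Spec_unique_purchase_totals; infer_instance

-- ===== CLAIM (what is proved, stated in full; the proofs are below) =====
def Claim_equal_unique_purchase_totals : Prop := ∀ (purchases : List (String × Option Int)), Dom_unique_purchase_totals purchases → Spec_unique_purchase_totals purchases (unique_purchase_totals purchases)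

-- ===== LEMMAS AND PROOFS =====

-- A's totals dict as a function of B's groups dict: same keys in the same order,
-- each value replaced by the sum of the set.
def uptMapOf (g : PySem.Dict String (PySem.Set Int)) : PySem.Dict String Int :=
  PySem.Dict.mk (g.items.map (fun p => (p.1, p.2.sum)))

theorem uptMapOf_keys (g : PySem.Dict String (PySem.Set Int)) :
    (uptMapOf g).keys = g.keys := by
  simp [uptMapOf, PySem.Dict.keys, List.map_map, Function.comp_def]

theorem uptMapOf_contains (g : PySem.Dict String (PySem.Set Int)) (k : String) :
    (uptMapOf g).contains k = g.contains k := by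
  rw [PySem.Dict.contains_eq_decide_mem_keys, PySem.Dict.contains_eq_decide_mem_keys,
    uptMapOf_keys]

theorem uptMapOf_get? (g : PySem.Dict String (PySem.Set Int)) (k : String) :
    (uptMapOf g).get? k = (g.get? k).map List.sum := by
  obtain ⟨l⟩ := g
  induction l with
  | nil => rfl
  | cons p rest ih =>
    obtain ⟨a, v⟩ := p
    simp only [uptMapOf] at ih ⊢
    simp only [List.map_cons, PySem.Dict.get?_mk_cons]
    split_ifs <;> simp [ih]

theorem uptMapOf_getD (g : PySem.Dict String (PySem.Set Int)) (k : String) :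
    (uptMapOf g).getD k 0 = (g.getD k PySem.Set.empty).sum := by
  rw [PySem.Dict.getD_eq_get?_getD, PySem.Dict.getD_eq_get?_getD, uptMapOf_get?]
  cases g.get? k <;> simp [PySem.Set.empty]

theorem uptMapOf_insert (g : PySem.Dict String (PySem.Set Int)) (k : String) (v : PySem.Set Int) :
    uptMapOf (g.insert k v) = (uptMapOf g).insert k v.sum := by
  apply PySem.Dict.ext
  have hc := uptMapOf_contains g k
  simp only [uptMapOf] at hc ⊢
  have hitems : (PySem.Dict.mk (g.items.map (fun p => (p.1, p.2.sum)))).items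
      = g.items.map (fun p => (p.1, p.2.sum)) := rfl
  rw [PySem.Dict.items_insert, PySem.Dict.items_insert, hc, hitems]
  split_ifs with h
  · rw [List.map_map, List.map_map]
    refine List.map_congr_left (fun p _ => ?_)
    by_cases hk : p.1 = k <;> simp [hk]
  · simp

theorem uptMapOf_setdefault (g : PySem.Dict String (PySem.Set Int)) (k : String) :
    uptMapOf (g.setdefault k PySem.Set.empty) = (uptMapOf g).setdefault k 0 := by
  by_cases h : g.contains k = true
  · rw [PySem.Dict.setdefault_of_contains _ _ h,
      PySem.Dict.setdefault_of_contains _ _ (by rw [uptMapOf_contains]; exact h)]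
  · rw [PySem.Dict.setdefault_of_not_contains _ _ (by simpa using h),
      PySem.Dict.setdefault_of_not_contains _ _ (by rw [uptMapOf_contains]; simpa using h),
      uptMapOf_insert]
    rfl

-- two items with the same key are equal when the keys are nodup
theorem upt_eq_of_mem_of_nodup_fst {α β : Type} (l : List (α × β))
    (h : (l.map Prod.fst).Nodup) {p q : α × β} (hp : p ∈ l) (hq : q ∈ l)
    (hfst : p.1 = q.1) : p = q := by
  induction l with
  | nil => cases hp
  | cons x rest ih =>
    rw [List.map_cons, List.nodup_cons] at h
    rcases List.mem_cons.mp hp with hp1 | hp1 <;> rcases List.mem_cons.mp hq with hq1 | hq1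
    · rw [hp1, hq1]
    · exfalso
      apply h.1
      rw [← hp1, hfst]
      exact List.mem_map_of_mem hq1
    · exfalso
      apply h.1
      rw [← hq1, ← hfst]
      exact List.mem_map_of_mem hp1
    · exact ih h.2 hp1 hq1

-- re-inserting the value already stored at a contained key changes nothing
theorem upt_insert_getD_self {ν : Type} (d : PySem.Dict String ν) (k : String) (d0 : ν)
    (hnd : d.keys.Nodup) (hc : d.contains k = true) :
    d.insert k (d.getD k d0) = d := by
  have hg : d.get? k = some (d.getD k d0) := by
    rw [PySem.Dict.contains_eq_isSome_get?] at hc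
    rw [PySem.Dict.getD_eq_get?_getD]
    cases h : d.get? k with
    | none => rw [h] at hc; cases hc
    | some v => simp
  have hmem : (k, d.getD k d0) ∈ d.items := PySem.Dict.mem_items_of_get?_eq_some d hg
  apply PySem.Dict.ext
  rw [PySem.Dict.items_insert_of_contains _ _ hc]
  refine (List.map_congr_left (fun p hp => ?_)).trans (List.map_id _)
  by_cases hk : p.1 = k
  · have : p = (k, d.getD k d0) := upt_eq_of_mem_of_nodup_fst d.items hnd hp hmem (by simpa using hk)
    simp [this]
  · simp [hk]

theorem upt_setdefault_keys_nodup (g : PySem.Dict String (PySem.Set Int))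
    (h : g.keys.Nodup) (u : String) :
    (g.setdefault u PySem.Set.empty).keys.Nodup := by
  rw [PySem.Dict.keys_setdefault]
  split_ifs with hc
  · exact h
  · refine List.Nodup.append h (List.nodup_singleton _) ?_
    intro a ha hb
    rw [List.mem_singleton] at hb
    subst hb
    exact absurd ((PySem.Dict.contains_iff_mem_keys g _).mpr ha) (by simpa using hc)

theorem uptStepB_keys_nodup (g : PySem.Dict String (PySem.Set Int))
    (h : g.keys.Nodup) (up : String × Option Int) : (uptStepB g up).keys.Nodup := by
  obtain ⟨u, a?⟩ := up
  have h1 := upt_setdefault_keys_nodup g h u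
  have hc : (g.setdefault u PySem.Set.empty).contains u = true := by
    simp [PySem.Dict.contains_setdefault]
  cases a? with
  | none => exact h1
  | some a =>
    simp only [uptStepB]
    split_ifs with ha
    · rw [PySem.Dict.modify, PySem.Dict.keys_insert_of_contains _ _ hc]
      exact h1
    · exact h1

-- one loop step: A's pair is exactly (uptMapOf of B's dict, B's dict)
theorem uptStep_eq (g : PySem.Dict String (PySem.Set Int)) (hnd : g.keys.Nodup)
    (up : String × Option Int) :
    uptStepA (uptMapOf g, g) up = (uptMapOf (uptStepB g up), uptStepB g up) := by
  obtain ⟨u, a?⟩ := up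
  have hc' : (g.setdefault u PySem.Set.empty).contains u = true := by
    simp [PySem.Dict.contains_setdefault]
  have hnd' := upt_setdefault_keys_nodup g hnd u
  cases a? with
  | none =>
    simp only [uptStepA, uptStepB]
    rw [uptMapOf_setdefault]
  | some a =>
    simp only [uptStepA, uptStepB]
    rw [← uptMapOf_setdefault]
    by_cases hpos : a > 0
    · rw [if_pos hpos, if_pos hpos]
      by_cases hmem : PySem.Set.contains
          ((g.setdefault u PySem.Set.empty).getD u PySem.Set.empty) a = true
      · rw [if_pos hmem]
        have hid : (g.setdefault u PySem.Set.empty).modify u PySem.Set.empty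
            (fun s => PySem.Set.add s a) = g.setdefault u PySem.Set.empty := by
          rw [PySem.Dict.modify]
          have hadd : PySem.Set.add
              ((g.setdefault u PySem.Set.empty).getD u PySem.Set.empty) a
              = (g.setdefault u PySem.Set.empty).getD u PySem.Set.empty := by
            show (if _ then _ else _) = _
            rw [if_pos hmem]
          rw [hadd]
          exact upt_insert_getD_self _ u PySem.Set.empty hnd' hc'
        rw [hid]
      · rw [if_neg (by simpa using hmem)]
        have hadd : PySem.Set.add
            ((g.setdefault u PySem.Set.empty).getD u PySem.Set.empty) a
            = (g.setdefault u PySem.Set.empty).getD u PySem.Set.empty ++ [a] := by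
          show (if _ then _ else _) = _
          rw [if_neg (by simpa using hmem)]
        have hmod : uptMapOf ((g.setdefault u PySem.Set.empty).modify u PySem.Set.empty
              (fun s => PySem.Set.add s a))
            = (uptMapOf (g.setdefault u PySem.Set.empty)).modify u 0 (· + a) := by
          rw [PySem.Dict.modify, PySem.Dict.modify, uptMapOf_insert, hadd, List.sum_append,
            uptMapOf_getD]
          simp
        rw [hmod]
    · rw [if_neg hpos, if_neg hpos]

theorem uptFold_eq (l : List (String × Option Int)) (g : PySem.Dict String (PySem.Set Int))
    (hnd : g.keys.Nodup) :
    l.foldl uptStepA (uptMapOf g, g) = (uptMapOf (l.foldl uptStepB g), l.foldl uptStepB g) := by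
  induction l generalizing g with
  | nil => rfl
  | cons x rest ih =>
    rw [List.foldl_cons, List.foldl_cons, uptStep_eq g hnd x,
      ih (uptStepB g x) (uptStepB_keys_nodup g hnd x)]

-- ===== VERDICT (by name: the statement is the Claim_ definition above) =====
theorem unique_purchase_totals_spec : Claim_equal_unique_purchase_totals := by
  intro purchases _
  show unique_purchase_totals purchases = unique_purchase_totals_alt purchases
  unfold unique_purchase_totals unique_purchase_totals_alt
  have h0 : (PySem.Dict.empty : PySem.Dict String Int) = uptMapOf PySem.Dict.empty := rfl
  rw [h0, uptFold_eq purchases PySem.Dict.empty (by simp [PySem.Dict.keys_empty])]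
  rfl
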